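-- pv_equiv track=rewrite | github.com/rdabrunk/Crosswords | Solving/puzzle_solver.py | to_vertical
-- ===== SOURCE A (Python) =====
-- def to_vertical(grid):
--     vertical_grid = []
--     for i in range(len(grid[0])):
--         column = []
--         for row in grid:
--             column.append(row[i])
--         new_column = ''.join(column).split('.')
--         vertical_grid.append(new_column)
--     return vertical_grid
-- ===== SOURCE B (Python) =====
-- def to_vertical(grid):
--     width = len(grid[0])
--     result = [[''] for _ in range(width)]
--     for row in grid:
--         for i in range(width):
--             for ch in row[i]:
--                 if ch == '.':
--                     result[i].append('')
--                 else:
--                     result[i][-1] += ch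
--     return result
-- ===== Notes on version B (the rewrite author's own statement) =====
-- stated objective: alternative
-- what changed: Replaces the column-major transpose + ''.join + str.split('.') with a single row-major pass that maintains per-column segment lists and performs the '.'-split incrementally character by character, never materializing the transposed column strings.
import Mathlib
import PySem

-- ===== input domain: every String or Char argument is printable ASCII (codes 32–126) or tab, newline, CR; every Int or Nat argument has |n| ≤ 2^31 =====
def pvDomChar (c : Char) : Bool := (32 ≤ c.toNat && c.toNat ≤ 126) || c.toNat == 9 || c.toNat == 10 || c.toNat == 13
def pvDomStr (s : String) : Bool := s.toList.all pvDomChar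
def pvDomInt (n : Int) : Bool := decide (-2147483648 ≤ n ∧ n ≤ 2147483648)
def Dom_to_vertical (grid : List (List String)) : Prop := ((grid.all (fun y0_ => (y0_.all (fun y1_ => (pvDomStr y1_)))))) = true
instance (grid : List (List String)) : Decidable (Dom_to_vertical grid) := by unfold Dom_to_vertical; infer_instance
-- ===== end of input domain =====

-- B replaces A's transpose + ''.join + split('.') by one row-major pass that splits on '.'
-- incrementally per column (objective: alternative decomposition, same asymptotic cost).

-- ===== PORT A =====
-- row[i] → pyGet?; the .getD "" default is reached only outside Pre_ (IndexError);
-- ''.join / .split('.') → PySem.Str.join / Str.split?; split? is none only for an empty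
-- separator and the separator here is the literal ".", so .getD [] is never reached.
def to_vertical (grid : List (List String)) : List (List String) :=
  (PySem.List.pyRange 0 ((grid.headD []).length : Int) 1).foldl (fun vertical_grid i =>
    let column := grid.foldl (fun col row => col ++ [(PySem.List.pyGet? row i).getD ""]) []
    let new_column := (PySem.Str.split? (PySem.Str.join "" column) ".").getD []
    vertical_grid ++ [new_column]) []

-- ===== PORT B =====
-- result[i][-1] += ch / result[i].append('') on one column's segment list; strings are
-- handled as their character lists (PySem convention) and rebuilt with String.ofList at the end.
def pvSegPush (segs : List (List Char)) (c : Char) : List (List Char) :=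
  if c = '.' then segs ++ [[]]
  else segs.dropLast ++ [(segs.getLast?.getD []) ++ [c]]

def to_vertical_alt (grid : List (List String)) : List (List String) :=
  let width := (grid.headD []).length
  let final := grid.foldl (fun res row =>
    (List.range width).foldl (fun res i =>
      res.set i ((((PySem.List.pyGet? row (i : Int)).getD "").toList).foldl pvSegPush (res.getD i []))) res)
    ((List.range width).map (fun _ => [[]]))
  final.map (fun segs => segs.map String.ofList)

-- ===== PRECONDITION & SPEC =====
-- Pre_ excludes exactly the inputs on which A raises IndexError: the empty grid (grid[0])
-- and grids where some row is shorter than the first row (row[i]).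
def Pre_to_vertical (grid : List (List String)) : Prop :=
  grid ≠ [] ∧ ∀ row ∈ grid, (grid.headD []).length ≤ row.length
instance (grid : List (List String)) : Decidable (Pre_to_vertical grid) := by
  unfold Pre_to_vertical; infer_instance
def pvWitness_to_vertical : List (List String) := [["a.b", ""], [".", "c"]]
def Spec_to_vertical (grid : List (List String)) (out : List (List String)) : Prop := out = to_vertical_alt grid
instance (grid : List (List String)) (out : List (List String)) : Decidable (Spec_to_vertical grid out) := by unfold Spec_to_vertical; infer_instance

-- ===== CLAIM (what is proved, stated in full; the proofs are below) =====
def Claim_equal_to_vertical : Prop := ∀ (grid : List (List String)), Dom_to_vertical grid → Pre_to_vertical grid → Spec_to_vertical grid (to_vertical grid)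

-- ===== LEMMAS AND PROOFS =====

-- the recursive specification of splitting a character list on '.'
def pvSplit : List Char → List (List Char)
  | [] => [[]]
  | c :: t => if c = '.' then [] :: pvSplit t else (pvSplit t).modifyHead (c :: ·)

lemma pvSplit_ne_nil : ∀ (cs : List Char), pvSplit cs ≠ []
  | [] => by simp [pvSplit]
  | c :: t => by
    have := pvSplit_ne_nil t
    simp only [pvSplit]
    split_ifs
    · simp
    · cases h : pvSplit t
      · exact absurd h this
      · simp

lemma intercalate_nil_left {α : Type} (l : List (List α)) : ([] : List α).intercalate l = l.flatten := by
  induction l with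
  | nil => rfl
  | cons h t ih =>
    cases t with
    | nil => simp [List.intercalate]
    | cons b t' =>
      simp only [List.intercalate, List.intersperse] at *
      simpa using ih

-- PySem's fuel-based splitOn, on separator ".", computes pvSplit
lemma splitOn_go_eq : ∀ (fuel : Nat) (l cur : List Char) (acc : List (List Char)),
    l.length < fuel →
    PySem.Chars.splitOn.go ['.'] fuel l cur acc
      = acc.reverse ++ (pvSplit l).modifyHead (cur.reverse ++ ·) := by
  intro fuel
  induction fuel with
  | zero => intro l cur acc h; omega
  | succ n ih =>
    intro l cur acc h
    cases l with
    | nil => simp [PySem.Chars.splitOn.go, pvSplit]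
    | cons c rest =>
      by_cases hc : c = '.'
      · subst hc
        rw [show PySem.Chars.splitOn.go ['.'] (n+1) ('.' :: rest) cur acc
              = PySem.Chars.splitOn.go ['.'] n rest [] (cur.reverse :: acc) from by
            simp [PySem.Chars.splitOn.go, List.isPrefixOf]]
        rw [ih rest [] (cur.reverse :: acc) (by simpa using Nat.lt_of_succ_lt_succ h)]
        cases hs : pvSplit rest with
        | nil => exact absurd hs (pvSplit_ne_nil rest)
        | cons a b => simp [pvSplit, hs]
      · rw [show PySem.Chars.splitOn.go ['.'] (n+1) (c :: rest) cur acc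
              = PySem.Chars.splitOn.go ['.'] n rest (c :: cur) acc from by
            simp only [PySem.Chars.splitOn.go, List.isPrefixOf]
            rw [if_neg (by intro h; simp at h; exact hc h.symm)]]
        rw [ih rest (c :: cur) acc (by simpa using Nat.lt_of_succ_lt_succ h)]
        cases hs : pvSplit rest with
        | nil => exact absurd hs (pvSplit_ne_nil rest)
        | cons a b => simp [pvSplit, hs, hc]

lemma splitOn_eq (cs : List Char) : PySem.Chars.splitOn cs ['.'] = pvSplit cs := by
  rw [PySem.Chars.splitOn, splitOn_go_eq (cs.length + 1) cs [] [] (Nat.lt_succ_self _)]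
  cases hs : pvSplit cs with
  | nil => exact absurd hs (pvSplit_ne_nil cs)
  | cons a b => simp

-- the incremental segment builder computes pvSplit
lemma foldl_pvSegPush : ∀ (cs : List Char) (segs : List (List Char)) (last : List Char),
    cs.foldl pvSegPush (segs ++ [last]) = segs ++ (pvSplit cs).modifyHead (last ++ ·) := by
  intro cs
  induction cs with
  | nil => intro segs last; simp [pvSplit]
  | cons c t ih =>
    intro segs last
    by_cases hc : c = '.'
    · subst hc
      have : pvSegPush (segs ++ [last]) '.' = (segs ++ [last]) ++ [[]] := by simp [pvSegPush]
      rw [List.foldl_cons, this, ih]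
      cases hs : pvSplit t with
      | nil => exact absurd hs (pvSplit_ne_nil t)
      | cons a b => simp [pvSplit, hs]
    · have : pvSegPush (segs ++ [last]) c = segs ++ [last ++ [c]] := by
        simp [pvSegPush, hc]
      rw [List.foldl_cons, this, ih]
      cases hs : pvSplit t with
      | nil => exact absurd hs (pvSplit_ne_nil t)
      | cons a b => simp [pvSplit, hs, hc]

lemma foldl_pvSegPush_nil (cs : List Char) : cs.foldl pvSegPush [[]] = pvSplit cs := by
  have := foldl_pvSegPush cs [] []
  simp at this
  rw [this]
  cases hs : pvSplit cs with
  | nil => exact absurd hs (pvSplit_ne_nil cs)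
  | cons a b => simp

-- B's inner loop (set at each index of range width) acts pointwise on a map over range width
lemma inner_loop_map (width : Nat) (f : Nat → List (List Char) → List (List Char))
    (g : Nat → List (List Char)) :
    (List.range width).foldl (fun r i => r.set i (f i (r.getD i []))) ((List.range width).map g)
      = (List.range width).map (fun i => f i (g i)) := by
  suffices h : ∀ n ≤ width,
      (List.range n).foldl (fun r i => r.set i (f i (r.getD i []))) ((List.range width).map g)
        = (List.range width).map (fun i => if i < n then f i (g i) else g i) by
    rw [h width le_rfl]
    exact List.map_congr_left (fun i hi => by simp [List.mem_range.mp hi])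
  intro n hn
  induction n with
  | zero => simp
  | succ m ih =>
    rw [List.range_succ, List.foldl_append, ih (Nat.le_of_succ_le hn)]
    have hm : m < width := hn
    have hget : ((List.range width).map (fun i => if i < m then f i (g i) else g i)).getD m [] = g m := by
      rw [List.getD_eq_getElem?_getD]
      simp [hm]
    simp only [List.foldl_cons, List.foldl_nil, hget]
    apply List.ext_getElem
    · simp
    · intro j h1 h2
      simp only [List.getElem_set, List.getElem_map, List.getElem_range] at *
      by_cases hj : m = j
      · subst hj; simp
      · rw [if_neg hj]
        by_cases hjm : j < m
        · rw [if_pos hjm, if_pos (by omega : j < m + 1)]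
        · rw [if_neg hjm, if_neg (by omega : ¬ j < m + 1)]

-- B's outer loop: the whole pass equals, per column, folding that column's characters
lemma outer_loop (width : Nat) (cell : List String → Nat → List Char) :
    ∀ (rows : List (List String)) (g : Nat → List (List Char)),
    rows.foldl (fun res row =>
        (List.range width).foldl (fun res i => res.set i ((cell row i).foldl pvSegPush (res.getD i []))) res)
      ((List.range width).map g)
      = (List.range width).map (fun i => rows.foldl (fun segs row => (cell row i).foldl pvSegPush segs) (g i)) := by
  intro rows
  induction rows with
  | nil => intro g; simp
  | cons r rest ih =>
    intro g
    rw [List.foldl_cons, inner_loop_map width (fun i segs => (cell r i).foldl pvSegPush segs) g,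
        ih (fun i => (cell r i).foldl pvSegPush (g i))]
    simp

-- ===== VERDICT (by name: the statement is the Claim_ definition above) =====
theorem to_vertical_spec : Claim_equal_to_vertical := by
  intro grid _ _
  unfold Spec_to_vertical to_vertical to_vertical_alt
  simp only [PySem.List.pyRange_zero_natCast, List.foldl_map,
    PySem.List.foldl_append_singleton_eq_map, List.nil_append, List.map_map,
    outer_loop ((grid.headD []).length) (fun row i => ((PySem.List.pyGet? row (i : Int)).getD "").toList) grid (fun _ => [[]])]
  apply List.map_congr_left
  intro i hi
  simp only [Function.comp_apply]
  have hb : grid.foldl (fun segs row => ((PySem.List.pyGet? row (i : Int)).getD "").toList.foldl pvSegPush segs) [[]]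
      = ((grid.map (fun row => ((PySem.List.pyGet? row (i : Int)).getD "").toList)).flatten).foldl pvSegPush [[]] := by
    rw [List.foldl_flatten, List.foldl_map]
  rw [hb, foldl_pvSegPush_nil]
  simp only [PySem.Str.split?, PySem.Chars.split?, PySem.Str.toList_join, List.map_map]
  rw [if_neg (by decide), show ("".toList : List Char) = [] from rfl,
    show (".".toList : List Char) = ['.'] from rfl, PySem.Chars.join, intercalate_nil_left,
    splitOn_eq]
  simp only [Function.comp_def, Option.map_some, Option.getD_some]
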